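-- pv_equiv track=rewrite | github.com/feeeper/podcast-shownotes | notebooks/segmentation.py | _index_mapping
-- ===== SOURCE A (Python) =====
-- def _index_mapping(segment_map):
--     index_list = []
--     temp = []
--     for index, i in enumerate(segment_map):
--         if i == 1:
--             index_list.append(temp)
--             temp = [index]
--         else:
--             temp.append(index)
--     index_list.append(temp)
--     return index_list
-- ===== SOURCE B (Python) =====
-- def _index_mapping(segment_map):
--     markers = [i for i, v in enumerate(segment_map) if v == 1]
--     boundaries = [0] + markers + [len(segment_map)]
--     return [list(range(b, e)) for b, e in zip(boundaries, boundaries[1:])]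
-- ===== Notes on version B (the rewrite author's own statement) =====
-- stated objective: simpler
-- what changed: Replaces A's single stateful grouping loop (accumulator list plus open group) by a two-pass decomposition: collect marker positions, form a boundary table of zero, the markers and the length, and emit each group as a contiguous range between consecutive boundaries.
import Mathlib
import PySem

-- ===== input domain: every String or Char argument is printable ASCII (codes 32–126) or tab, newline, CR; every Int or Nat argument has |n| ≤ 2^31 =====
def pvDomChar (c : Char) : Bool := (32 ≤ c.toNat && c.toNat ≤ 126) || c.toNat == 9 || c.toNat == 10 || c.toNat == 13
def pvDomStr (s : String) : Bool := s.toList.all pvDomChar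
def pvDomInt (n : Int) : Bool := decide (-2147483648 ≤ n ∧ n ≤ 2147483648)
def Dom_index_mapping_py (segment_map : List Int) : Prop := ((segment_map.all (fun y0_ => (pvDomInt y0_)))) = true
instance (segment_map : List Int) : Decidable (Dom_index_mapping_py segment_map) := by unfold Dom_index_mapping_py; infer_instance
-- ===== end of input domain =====

-- B replaces A's single grouping loop by a two-pass decomposition: collect the marker
-- positions first, then emit each group as a contiguous index range between boundaries
-- (objective: simpler).

-- ===== PORT A =====
def index_mapping_py (segment_map : List Int) : List (List Int) :=
  let st := (PySem.List.enumerate segment_map 0).foldl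
    (fun (s : List (List Int) × List Int) p =>
      if p.2 = 1 then (s.1 ++ [s.2], [p.1]) else (s.1, s.2 ++ [p.1]))
    ([], [])
  st.1 ++ [st.2]

-- ===== PORT B =====
def index_mapping_py_alt (segment_map : List Int) : List (List Int) :=
  let markers := ((PySem.List.enumerate segment_map 0).filter (fun p => p.2 == 1)).map (·.1)
  let boundaries := (0 : Int) :: (markers ++ [(segment_map.length : Int)])
  (boundaries.zip boundaries.tail).map (fun p => PySem.List.pyRange p.1 p.2 1)

-- ===== PRECONDITION & SPEC =====
def Spec_index_mapping_py (segment_map : List Int) (out : List (List Int)) : Prop := out = index_mapping_py_alt segment_map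
instance (segment_map : List Int) (out : List (List Int)) : Decidable (Spec_index_mapping_py segment_map out) := by unfold Spec_index_mapping_py; infer_instance

-- ===== CLAIM (what is proved, stated in full; the proofs are below) =====
def Claim_equal_index_mapping_py : Prop := ∀ (segment_map : List Int), Dom_index_mapping_py segment_map → Spec_index_mapping_py segment_map (index_mapping_py segment_map)

-- ===== LEMMAS AND PROOFS =====

-- common recursive spec: groups of indices starting at k, with open current group `cur`
def pvGroups (cur : List Int) (k : Int) : List Int → List (List Int)
  | [] => [cur]
  | x :: xs => if x = 1 then cur :: pvGroups [k] (k + 1) xs else pvGroups (cur ++ [k]) (k + 1) xs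

-- marker positions of a list whose first index is k
def pvMarkers (k : Int) : List Int → List Int
  | [] => []
  | x :: xs => if x = 1 then k :: pvMarkers (k + 1) xs else pvMarkers (k + 1) xs

-- the consecutive-boundary ranges B builds
def pvRanges (bs : List Int) : List (List Int) :=
  (bs.zip bs.tail).map (fun p => PySem.List.pyRange p.1 p.2 1)

theorem pvFoldA (l : List Int) : ∀ (k : Int) (acc : List (List Int)) (cur : List Int),
    ((PySem.List.enumerate l k).foldl
        (fun (s : List (List Int) × List Int) p =>
          if p.2 = 1 then (s.1 ++ [s.2], [p.1]) else (s.1, s.2 ++ [p.1])) (acc, cur)).1 ++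
      [((PySem.List.enumerate l k).foldl
        (fun (s : List (List Int) × List Int) p =>
          if p.2 = 1 then (s.1 ++ [s.2], [p.1]) else (s.1, s.2 ++ [p.1])) (acc, cur)).2]
      = acc ++ pvGroups cur k l := by
  induction l with
  | nil => intro k acc cur; simp [PySem.List.enumerate_nil, pvGroups]
  | cons x xs ih =>
    intro k acc cur
    rw [PySem.List.enumerate_cons]
    simp only [List.foldl_cons, pvGroups]
    by_cases hx : x = 1
    · rw [if_pos hx, if_pos hx]
      rw [ih (k + 1) (acc ++ [cur]) [k]]
      simp
    · rw [if_neg hx, if_neg hx]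
      exact ih (k + 1) acc (cur ++ [k])

theorem pvMarkersB (l : List Int) : ∀ (k : Int),
    ((PySem.List.enumerate l k).filter (fun p => p.2 == 1)).map (·.1) = pvMarkers k l := by
  induction l with
  | nil => intro k; simp [PySem.List.enumerate_nil, pvMarkers]
  | cons x xs ih =>
    intro k
    rw [PySem.List.enumerate_cons]
    by_cases hx : x = 1
    · simp [pvMarkers, hx, ih]
    · simp [pvMarkers, hx, ih]

theorem pvRangesGroups (l : List Int) : ∀ (k b : Int), b ≤ k →
    pvRanges (b :: (pvMarkers k l ++ [k + (l.length : Int)])) =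
      pvGroups (PySem.List.pyRange b k 1) k l := by
  induction l with
  | nil =>
    intro k b _
    simp [pvRanges, pvMarkers, pvGroups]
  | cons x xs ih =>
    intro k b hbk
    by_cases hx : x = 1
    · simp only [pvMarkers, pvGroups, hx]
      have h2 := ih (k + 1) k (by omega)
      simp only [pvRanges, List.tail_cons] at h2 ⊢
      rw [PySem.List.pyRange_one_singleton] at h2
      simp only [List.length_cons]
      have harr : k + ((xs.length : Int) + 1) = k + 1 + (xs.length : Int) := by ring
      rw [show ((xs.length + 1 : Nat) : Int) = (xs.length : Int) + 1 by push_cast; ring, harr]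
      exact congrArg (PySem.List.pyRange b k 1 :: ·) h2
    · simp only [pvMarkers, pvGroups, hx]
      have h2 := ih (k + 1) b (by omega)
      rw [PySem.List.pyRange_one_succ_right hbk] at h2
      simp only [List.length_cons]
      rw [show ((xs.length + 1 : Nat) : Int) = (xs.length : Int) + 1 by push_cast; ring,
        show k + ((xs.length : Int) + 1) = k + 1 + (xs.length : Int) by ring]
      exact h2

-- ===== VERDICT (by name: the statement is the Claim_ definition above) =====
theorem index_mapping_py_spec : Claim_equal_index_mapping_py := by
  intro l _
  show index_mapping_py l = index_mapping_py_alt l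
  unfold index_mapping_py index_mapping_py_alt
  rw [pvFoldA l 0 [] [], pvMarkersB l 0]
  have := pvRangesGroups l 0 0 le_rfl
  simp only [pvRanges, zero_add] at this
  rw [PySem.List.pyRange_one_eq_nil le_rfl] at this
  simpa using this.symm
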